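-- pv_equiv track=rewrite | github.com/dhhyy/programmers- | code/부족한금액계산하기.py | solution
-- ===== SOURCE A (Python) =====
-- def solution(price, money, count):
--     answer = -1
--
--     total_price = 0
--
--     for i in range(1, count + 1):
--         total_price += price * i
--
--     if total_price >= money:
--         answer = total_price - money
--
--     else:
--         answer = 0
--
--     return answer
-- ===== SOURCE B (Python) =====
-- def solution(price, money, count):
--     n = max(count, 0)
--     total = price * n * (n + 1) // 2
--     return max(total - money, 0)
-- ===== Notes on version B (the rewrite author's own statement) =====
-- stated objective: faster
-- what changed: Replaces the O(count) accumulation loop with the closed-form arithmetic-series formula price*n*(n+1)//2 and max() instead of the if/else.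
import Mathlib
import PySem

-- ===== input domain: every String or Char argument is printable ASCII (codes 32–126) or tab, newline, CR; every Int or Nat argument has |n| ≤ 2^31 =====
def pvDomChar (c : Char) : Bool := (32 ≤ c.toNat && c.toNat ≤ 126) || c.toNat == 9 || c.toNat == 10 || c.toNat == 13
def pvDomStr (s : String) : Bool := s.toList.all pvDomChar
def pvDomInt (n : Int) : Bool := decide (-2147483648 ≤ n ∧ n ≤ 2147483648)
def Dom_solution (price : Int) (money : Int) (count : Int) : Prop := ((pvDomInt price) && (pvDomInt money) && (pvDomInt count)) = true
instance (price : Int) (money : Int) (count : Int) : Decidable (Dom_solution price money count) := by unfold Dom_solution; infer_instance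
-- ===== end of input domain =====

-- B replaces A's O(count) summation loop with the closed-form arithmetic series price*n*(n+1)//2 (objective: faster).

-- ===== PORT A =====
def solution (price : Int) (money : Int) (count : Int) : Int :=
  -- answer = -1 (immediately overwritten below, kept for fidelity)
  let _answer : Int := -1
  let total_price : Int :=
    (PySem.List.pyRange 1 (count + 1) 1).foldl (fun acc i => acc + price * i) 0
  if total_price ≥ money then total_price - money else 0

-- ===== PORT B =====
def solution_alt (price : Int) (money : Int) (count : Int) : Int :=
  let n : Int := max count 0
  let total : Int := PySem.Int.floordiv (price * n * (n + 1)) 2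
  max (total - money) 0

-- ===== PRECONDITION & SPEC =====
def Spec_solution (price : Int) (money : Int) (count : Int) (out : Int) : Prop := out = solution_alt price money count
instance (price : Int) (money : Int) (count : Int) (out : Int) : Decidable (Spec_solution price money count out) := by unfold Spec_solution; infer_instance

-- ===== CLAIM (what is proved, stated in full; the proofs are below) =====
def Claim_equal_solution : Prop := ∀ (price : Int) (money : Int) (count : Int), Dom_solution price money count → Spec_solution price money count (solution price money count)

-- ===== LEMMAS AND PROOFS =====

theorem pv_sum_loop (price : Int) (n : Nat) :
    2 * ((PySem.List.pyRange 1 ((n : Int) + 1) 1).foldl (fun acc i => acc + price * i) 0)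
      = price * (n : Int) * ((n : Int) + 1) := by
  induction n with
  | zero =>
    rw [PySem.List.pyRange_one_eq_nil (by simp)]
    simp
  | succ m ih =>
    have h : PySem.List.pyRange 1 (((m + 1 : Nat) : Int) + 1) 1
        = PySem.List.pyRange 1 ((m : Int) + 1) 1 ++ [(m : Int) + 1] := by
      have := PySem.List.pyRange_one_succ_right (a := 1) (b := (m : Int) + 1) (by omega)
      push_cast
      push_cast at this
      convert this using 2
    rw [h, List.foldl_append]
    simp only [List.foldl_cons, List.foldl_nil]
    push_cast
    nlinarith [ih]

theorem pv_loop_closed (price : Int) (count : Int) :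
    (PySem.List.pyRange 1 (count + 1) 1).foldl (fun acc i => acc + price * i) 0
      = PySem.Int.floordiv (price * (max count 0) * (max count 0 + 1)) 2 := by
  have hS : 2 * ((PySem.List.pyRange 1 (count + 1) 1).foldl (fun acc i => acc + price * i) 0)
      = price * (max count 0) * (max count 0 + 1) := by
    rcases le_or_gt count 0 with h | h
    · rw [PySem.List.pyRange_one_eq_nil (by omega)]
      simp only [List.foldl_nil, mul_zero]
      have : max count 0 = 0 := by omega
      rw [this]; ring
    · have hn : count = ((count.toNat : Nat) : Int) := by omega
      have hm : max count 0 = count := by omega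
      rw [hm, hn]
      exact pv_sum_loop price count.toNat
  rw [← hS, PySem.Int.floordiv_eq_ediv_of_pos (by omega)]
  omega

-- ===== VERDICT (by name: the statement is the Claim_ definition above) =====
theorem solution_spec : Claim_equal_solution := by
  intro price money count _
  unfold Spec_solution solution solution_alt
  simp only []
  rw [pv_loop_closed]
  split_ifs with h <;> omega
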